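-- pv_equiv track=rewrite | github.com/dvrkoo/QuantumML | quantum_layer.py | generate_paulis
-- ===== SOURCE A (Python) =====
-- def generate_paulis(
--     identities: int, paulis: int, output: str, qubits: int, locality: int
-- ):
--     # Base case: if the output string's length matches the number of qubits, yield it.
--     if len(output) == qubits:
--         yield output
--     else:
--         # Recursive case: add an "I" (identity) to the output string.
--         yield from generate_paulis(
--             identities + 1, paulis, output + "I", qubits, locality
--         )
--
--         # If the number of Pauli operators used is less than the locality, add "X", "Y", or "Z"
--         # systematically builds all possible Pauli strings that conform to the specified locality.
--         if paulis < locality: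
--             yield from generate_paulis(
--                 identities, paulis + 1, output + "X", qubits, locality
--             )
--             yield from generate_paulis(
--                 identities, paulis + 1, output + "Y", qubits, locality
--             )
--             yield from generate_paulis(
--                 identities, paulis + 1, output + "Z", qubits, locality
--             )
-- ===== SOURCE B (Python) =====
-- def generate_paulis(
--     identities: int, paulis: int, output: str, qubits: int, locality: int
-- ):
--     n = qubits - len(output)
--     budget = min(max(locality - paulis, 0), n)
--     # S[b] = all suffixes of the current length with at most b non-identity letters,
--     # in lexicographic order over I < X < Y < Z; grown bottom-up by prepending.
--     S = [[""] for _ in range(budget + 1)]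
--     for _ in range(n):
--         S = [
--             ["I" + s for s in S[b]]
--             + ([c + s for c in "XYZ" for s in S[b - 1]] if b else [])
--             for b in range(budget + 1)
--         ]
--     for s in S[budget]:
--         yield output + s
-- ===== Notes on version B (the rewrite author's own statement) =====
-- stated objective: alternative
-- what changed: Replaces A's 4-way recursive DFS generator over growing output strings by a bottom-up dynamic-programming table S[b] of all suffixes of the current length with at most b non-identity letters (budget capped at min(max(locality-paulis,0), remaining length)), which reproduces A's exact lexicographic emission order.
import Mathlib
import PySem

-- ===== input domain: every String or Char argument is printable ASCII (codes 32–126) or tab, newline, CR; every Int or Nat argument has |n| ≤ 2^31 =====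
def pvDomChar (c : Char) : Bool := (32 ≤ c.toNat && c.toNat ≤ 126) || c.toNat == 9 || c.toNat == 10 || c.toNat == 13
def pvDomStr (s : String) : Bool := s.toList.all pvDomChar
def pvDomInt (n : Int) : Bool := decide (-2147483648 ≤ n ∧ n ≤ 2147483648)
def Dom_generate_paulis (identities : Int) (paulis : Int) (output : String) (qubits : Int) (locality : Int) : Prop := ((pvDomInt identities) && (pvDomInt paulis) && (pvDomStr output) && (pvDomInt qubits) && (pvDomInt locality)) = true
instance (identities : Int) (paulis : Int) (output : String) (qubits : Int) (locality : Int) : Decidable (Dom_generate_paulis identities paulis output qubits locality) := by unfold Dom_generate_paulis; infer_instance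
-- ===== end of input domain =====

-- B replaces A's 4-way DFS generator by a bottom-up DP table S[b] = suffixes with at most b
-- non-identity letters (alternative decomposition; same emission order, output-proportional cost).
-- Both Pythons are generators; equivalence is about the emitted sequence (list of yields).


-- ===== PORT A =====
-- A's recursion adds one character per level until len(output) == qubits; the fuel
-- (qubits - len(output)).toNat counts exactly those levels on inputs where A terminates.
def gpAux (fuel : Nat) (identities : Int) (paulis : Int) (out : List Char) (qubits : Int) (locality : Int) : List String :=
  match fuel with
  | 0 => if (out.length : Int) = qubits then [String.mk out] else []
  | fuel + 1 =>
    if (out.length : Int) = qubits then [String.mk out]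
    else
      gpAux fuel (identities + 1) paulis (out ++ ['I']) qubits locality ++
      (if paulis < locality then
        gpAux fuel identities (paulis + 1) (out ++ ['X']) qubits locality ++
        gpAux fuel identities (paulis + 1) (out ++ ['Y']) qubits locality ++
        gpAux fuel identities (paulis + 1) (out ++ ['Z']) qubits locality
      else [])

def generate_paulis (identities : Int) (paulis : Int) (output : String) (qubits : Int) (locality : Int) : List String :=
  gpAux (qubits - (output.toList.length : Int)).toNat identities paulis output.toList qubits locality

-- ===== PORT B =====
-- one DP step: from the table of suffixes of length m to length m+1 (Python's inner comprehension)
def pvNext (S : List (List (List Char))) : List (List (List Char)) :=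
  (List.range S.length).map (fun b =>
    ((S.getD b []).map (fun s => 'I' :: s)) ++
    (if b ≠ 0 then (['X', 'Y', 'Z'] : List Char).flatMap (fun c => (S.getD (b - 1) []).map (fun s => c :: s)) else []))

def generate_paulis_alt (identities : Int) (paulis : Int) (output : String) (qubits : Int) (locality : Int) : List String :=
  let n := (qubits - (output.toList.length : Int)).toNat
  let budget := (min (max (locality - paulis) 0) (n : Int)).toNat
  let S := (List.range n).foldl (fun S _ => pvNext S) (List.replicate (budget + 1) [([] : List Char)])
  (S.getD budget []).map (fun s => String.mk (output.toList ++ s))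

-- ===== PRECONDITION & SPEC =====
-- Pre_ excludes exactly len(output) > qubits (incl. negative qubits): there A never reaches
-- its base case and raises RecursionError (and B raises IndexError on its empty table).
def Pre_generate_paulis (identities : Int) (paulis : Int) (output : String) (qubits : Int) (locality : Int) : Prop :=
  (output.toList.length : Int) ≤ qubits
instance (identities : Int) (paulis : Int) (output : String) (qubits : Int) (locality : Int) : Decidable (Pre_generate_paulis identities paulis output qubits locality) := by unfold Pre_generate_paulis; infer_instance

def pvWitness_generate_paulis : Int × Int × String × Int × Int := (0, 0, "X", 2, 1)

def Spec_generate_paulis (identities : Int) (paulis : Int) (output : String) (qubits : Int) (locality : Int) (out : List String) : Prop := out = generate_paulis_alt identities paulis output qubits locality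
instance (identities : Int) (paulis : Int) (output : String) (qubits : Int) (locality : Int) (out : List String) : Decidable (Spec_generate_paulis identities paulis output qubits locality out) := by unfold Spec_generate_paulis; infer_instance

-- ===== CLAIM (what is proved, stated in full; the proofs are below) =====
def Claim_equal_generate_paulis : Prop := ∀ (identities : Int) (paulis : Int) (output : String) (qubits : Int) (locality : Int), Dom_generate_paulis identities paulis output qubits locality → Pre_generate_paulis identities paulis output qubits locality → Spec_generate_paulis identities paulis output qubits locality (generate_paulis identities paulis output qubits locality)

-- ===== LEMMAS AND PROOFS =====

-- all length-n words over I,X,Y,Z in A's (and B's) emission order: first letter slowest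
def pvProd4 : Nat → List (List Char)
  | 0 => [[]]
  | n + 1 => (['I', 'X', 'Y', 'Z'] : List Char).flatMap (fun c => (pvProd4 n).map (fun s => c :: s))

def pvCnt (s : List Char) : Nat := (s.filter (fun c => c ≠ 'I')).length

lemma pvCnt_cons_I (s : List Char) : pvCnt ('I' :: s) = pvCnt s := by
  simp [pvCnt]

lemma pvCnt_cons_ne {c : Char} (h : c ≠ 'I') (s : List Char) :
    pvCnt (c :: s) = pvCnt s + 1 := by
  simp [pvCnt, h]

lemma pvProd4_length {n : Nat} {s : List Char} (h : s ∈ pvProd4 n) : s.length = n := by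
  induction n generalizing s with
  | zero => simp [pvProd4] at h; simp [h]
  | succ n ih =>
    simp only [pvProd4, List.mem_flatMap, List.mem_map] at h
    obtain ⟨c, _, t, ht, rfl⟩ := h
    simp [ih ht]

-- splitting the filtered product of length n+1 by its first letter
lemma pvFilter_succ (n : Nat) (b : Nat) :
    (pvProd4 (n + 1)).filter (fun s => pvCnt s ≤ b) =
      ((pvProd4 n).filter (fun s => pvCnt s ≤ b)).map (fun s => 'I' :: s) ++
      (if b ≠ 0 then (['X', 'Y', 'Z'] : List Char).flatMap
          (fun c => ((pvProd4 n).filter (fun s => pvCnt s ≤ b - 1)).map (fun s => c :: s))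
        else []) := by
  have seg : ∀ c : Char, c ≠ 'I' →
      ((pvProd4 n).map (fun s => c :: s)).filter (fun s => pvCnt s ≤ b) =
        ((pvProd4 n).filter (fun s => b ≠ 0 ∧ pvCnt s ≤ b - 1)).map (fun s => c :: s) := by
    intro c hc
    rw [List.filter_map]
    congr 1
    apply List.filter_congr
    intro s _
    simp only [Function.comp_apply, pvCnt_cons_ne hc, decide_eq_decide]
    omega
  have segI : ((pvProd4 n).map (fun s => 'I' :: s)).filter (fun s => pvCnt s ≤ b) =
      ((pvProd4 n).filter (fun s => pvCnt s ≤ b)).map (fun s => 'I' :: s) := by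
    rw [List.filter_map]
    congr 1
  simp only [pvProd4, List.flatMap_cons, List.flatMap_nil, List.append_nil,
    List.filter_append, segI, seg 'X' (by decide), seg 'Y' (by decide), seg 'Z' (by decide)]
  by_cases hb : b = 0
  · subst hb
    simp
  · simp [hb]

lemma getD_map_range {α : Type} (m : Nat) (f : Nat → α) (b : Nat) (d : α) (h : b < m) :
    ((List.range m).map f).getD b d = f b := by
  rw [List.getD_eq_getElem?_getD, List.getElem?_map, List.getElem?_range h]
  rfl

-- the DP invariant: after n steps row b holds exactly the length-n words with ≤ b non-identities
lemma pvDP (B : Nat) (n : Nat) :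
    (List.range n).foldl (fun S _ => pvNext S) (List.replicate (B + 1) [([] : List Char)]) =
      (List.range (B + 1)).map (fun b => (pvProd4 n).filter (fun s => pvCnt s ≤ b)) := by
  induction n with
  | zero =>
    simp [pvProd4, pvCnt, List.map_const']
  | succ n ih =>
    rw [List.range_succ, List.foldl_append, ih]
    simp only [List.foldl_cons, List.foldl_nil, pvNext, List.length_map, List.length_range]
    apply List.map_congr_left
    intro b hb
    have hb' : b < B + 1 := List.mem_range.mp hb
    rw [getD_map_range _ _ _ _ hb', pvFilter_succ]
    by_cases h0 : b = 0
    · simp [h0]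
    · have hb1 : b - 1 < B + 1 := by omega
      simp only [h0, ne_eq, not_false_eq_true, if_true, getD_map_range _ _ _ _ hb1]

-- A's DFS from state (paulis = p) emits exactly the suffixes fitting budget max (l - p) 0,
-- in product order (first position slowest)
lemma gpAux_eq (n : Nat) : ∀ (i p : Int) (out : List Char) (q l : Int),
    (out.length : Int) + n = q →
    gpAux n i p out q l =
      ((pvProd4 n).filter (fun s => (pvCnt s : Int) ≤ max (l - p) 0)).map
        (fun s => String.mk (out ++ s)) := by
  induction n with
  | zero =>
    intro i p out q l h
    have hq : (out.length : Int) = q := by omega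
    simp [gpAux, pvProd4, hq, pvCnt]
  | succ n ih =>
    intro i p out q l h
    have hq : ¬ ((out.length : Int) = q) := by omega
    have hlen : ∀ c : Char, ((out ++ [c]).length : Int) + n = q := by
      intro c; simp; omega
    have seg : ∀ c : Char,
        (((pvProd4 n).map (fun s => c :: s)).filter
            (fun s => (pvCnt s : Int) ≤ max (l - p) 0)).map (fun s => String.mk (out ++ s)) =
        ((pvProd4 n).filter (fun s => (pvCnt (c :: s) : Int) ≤ max (l - p) 0)).map
          (fun s => String.mk (out ++ [c] ++ s)) := by
      intro c
      rw [List.filter_map, List.map_map]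
      congr 1
      funext s
      simp
    simp only [gpAux, hq, if_false, pvProd4, List.flatMap_cons, List.flatMap_nil,
      List.append_nil, List.filter_append, List.map_append]
    rw [seg 'I', seg 'X', seg 'Y', seg 'Z']
    have hI : ((pvProd4 n).filter (fun s => (pvCnt ('I' :: s) : Int) ≤ max (l - p) 0)).map
        (fun s => String.mk (out ++ ['I'] ++ s)) = gpAux n (i + 1) p (out ++ ['I']) q l := by
      rw [ih (i + 1) p (out ++ ['I']) q l (hlen 'I')]
      simp [pvCnt_cons_I]
    by_cases hp : p < l
    · have hseg2 : ∀ c : Char, c ≠ 'I' →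
          ((pvProd4 n).filter (fun s => (pvCnt (c :: s) : Int) ≤ max (l - p) 0)).map
            (fun s => String.mk (out ++ [c] ++ s)) =
          gpAux n i (p + 1) (out ++ [c]) q l := by
        intro c hc
        rw [ih i (p + 1) (out ++ [c]) q l (hlen c)]
        congr 1
        apply List.filter_congr
        intro s _
        rw [pvCnt_cons_ne hc]
        simp only [decide_eq_decide]
        push_cast
        omega
      rw [hI, hseg2 'X' (by decide), hseg2 'Y' (by decide), hseg2 'Z' (by decide)]
      simp [hp]
    · have hseg0 : ∀ c : Char, c ≠ 'I' →
          ((pvProd4 n).filter (fun s => (pvCnt (c :: s) : Int) ≤ max (l - p) 0)) = [] := by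
        intro c hc
        apply List.filter_eq_nil_iff.mpr
        intro s _
        rw [pvCnt_cons_ne hc]
        simp only [decide_eq_true_eq, not_le]
        push_cast
        omega
      rw [hI, hseg0 'X' (by decide), hseg0 'Y' (by decide), hseg0 'Z' (by decide)]
      simp [hp]

-- ===== VERDICT (by name: the statement is the Claim_ definition above) =====
theorem generate_paulis_spec : Claim_equal_generate_paulis := by
  intro i p output q l _ hpre
  unfold Pre_generate_paulis at hpre
  unfold Spec_generate_paulis generate_paulis
  simp only [generate_paulis_alt]
  set n : Nat := (q - (output.toList.length : Int)).toNat with hn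
  set budget : Nat := (min (max (l - p) 0) (n : Int)).toNat with hbudget
  have h : ((output.toList.length : Int)) + (n : Nat) = q := by omega
  rw [gpAux_eq n i p output.toList q l h, pvDP budget n,
    getD_map_range _ _ _ _ (by omega : budget < budget + 1)]
  congr 1
  apply List.filter_congr
  intro s hs
  have hlen := pvProd4_length hs
  have hcnt : pvCnt s ≤ n := by
    have : pvCnt s ≤ s.length := List.length_filter_le _ _
    omega
  simp only [decide_eq_decide]
  omega
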